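-- pv_equiv track=rewrite | github.com/huuthieu/aeroeyes-bluemind | process_public_test_mask.py | group_detections_by_intervals
-- ===== SOURCE A (Python) =====
-- from typing import List, Dict, Any, Tuple, Optional
--
-- def group_detections_by_intervals(
--     detections_per_frame: Dict[int, List[Dict]]
-- ) -> List[List[Dict]]:
--     """
--     Group consecutive frame detections into intervals
--
--     Args:
--         detections_per_frame: Dict mapping frame number to list of detections
--
--     Returns:
--         List of intervals, each interval is a list of bbox dicts
--     """
--     if not detections_per_frame:
--         return []
--
--     # Sort frames
--     sorted_frames = sorted(detections_per_frame.keys())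
--
--     intervals = []
--     current_interval = []
--     last_frame = None
--
--     for frame in sorted_frames:
--         detections = detections_per_frame[frame]
--
--         if not detections:
--             # No detections in this frame
--             if current_interval:
--                 intervals.append(current_interval)
--                 current_interval = []
--             last_frame = None
--             continue
--
--         # Check if this frame is consecutive with previous
--         if last_frame is not None and frame - last_frame > 1:
--             # Gap detected, start new interval
--             if current_interval:
--                 intervals.append(current_interval)
--             current_interval = []
--
--         # Add all detections from this frame
--         for det in detections:
--             bbox = det.get("bbox", {})
--             current_interval.append({
--                 "frame": frame,
--                 "x1": int(bbox.get("x1", 0)),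
--                 "y1": int(bbox.get("y1", 0)),
--                 "x2": int(bbox.get("x2", 0)),
--                 "y2": int(bbox.get("y2", 0))
--             })
--
--         last_frame = frame
--
--     # Add last interval if exists
--     if current_interval:
--         intervals.append(current_interval)
--
--     return intervals
-- ===== SOURCE B (Python) =====
-- def group_detections_by_intervals(detections_per_frame):
--     """Group consecutive frame detections into intervals.
--
--     Same result as the original, computed without the current/last state
--     machine: keep only frames that have detections, sort them, and bucket
--     them into a dict keyed by frame - position (constant exactly on each
--     maximal run of consecutive frames); the dict's values, in insertion
--     order, are the intervals.
--     """
--     frames = sorted(f for f, dets in detections_per_frame.items() if dets)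
--     groups = {}
--     for i, f in enumerate(frames):
--         groups.setdefault(f - i, []).extend(
--             {
--                 "frame": f,
--                 "x1": int(det.get("bbox", {}).get("x1", 0)),
--                 "y1": int(det.get("bbox", {}).get("y1", 0)),
--                 "x2": int(det.get("bbox", {}).get("x2", 0)),
--                 "y2": int(det.get("bbox", {}).get("y2", 0)),
--             }
--             for det in detections_per_frame[f]
--         )
--     return list(groups.values())
-- ===== Notes on version B (the rewrite author's own statement) =====
-- stated objective: alternative
-- what changed: Replaces the intervals/current_interval/last_frame flush state machine over all sorted frames by: filter out empty-detection frames, sort, then bucket the frames into a dict keyed by frame - index (constant exactly on each maximal consecutive run, groupby-style) and return the dict's values.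
import Mathlib
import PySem

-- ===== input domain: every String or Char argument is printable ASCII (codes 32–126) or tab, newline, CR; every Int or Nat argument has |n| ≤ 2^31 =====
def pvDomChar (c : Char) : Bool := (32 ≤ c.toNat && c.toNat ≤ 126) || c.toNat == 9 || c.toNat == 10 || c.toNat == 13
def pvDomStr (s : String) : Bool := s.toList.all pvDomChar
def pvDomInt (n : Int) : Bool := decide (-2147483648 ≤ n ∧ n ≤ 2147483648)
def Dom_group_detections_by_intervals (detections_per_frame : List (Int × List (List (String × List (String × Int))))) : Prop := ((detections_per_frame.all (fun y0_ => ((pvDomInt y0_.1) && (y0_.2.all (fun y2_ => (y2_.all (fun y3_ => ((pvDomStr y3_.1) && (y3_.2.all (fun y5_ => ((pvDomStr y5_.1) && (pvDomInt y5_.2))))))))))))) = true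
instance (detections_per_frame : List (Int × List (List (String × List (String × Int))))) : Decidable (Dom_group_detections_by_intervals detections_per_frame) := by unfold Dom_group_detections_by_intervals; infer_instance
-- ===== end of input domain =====

-- B groups the sorted non-empty frames by the key frame - index (constant on each maximal
-- consecutive run) in an insertion-ordered dict, instead of A's current/last flush state machine.
-- A is total; the equivalence is claimed on the whole domain.

-- ===== PORT A =====

-- shared renderer: the {"frame": …, "x1": …, …} dict built from one detection (both Pythons build it verbatim)
def pvBox (frame : Int) (det : List (String × List (String × Int))) : List (String × Int) :=
  let bbox := (PySem.Dict.ofList det).getD "bbox" []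
  let b := PySem.Dict.ofList bbox
  [("frame", frame), ("x1", b.getD "x1" 0), ("y1", b.getD "y1" 0),
   ("x2", b.getD "x2" 0), ("y2", b.getD "y2" 0)]

-- body of A's `for frame in sorted_frames` loop; state = (intervals, current_interval, last_frame)
def pvStepA (d : PySem.Dict Int (List (List (String × List (String × Int)))))
    (st : List (List (List (String × Int))) × List (List (String × Int)) × Option Int)
    (frame : Int) :
    List (List (List (String × Int))) × List (List (String × Int)) × Option Int :=
  let intervals := st.1
  let current := st.2.1
  let last := st.2.2
  -- `detections_per_frame[frame]`: frame is a key of the dict, so plain lookup = getD (exact here)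
  let dets := d.getD frame []
  if dets = [] then
    ((if current = [] then intervals else intervals ++ [current]), [], none)
  else
    let ic :=
      match last with
      | some lf =>
        if frame - lf > 1 then
          ((if current = [] then intervals else intervals ++ [current]),
           ([] : List (List (String × Int))))
        else (intervals, current)
      | none => (intervals, current)
    (ic.1, ic.2 ++ dets.map (pvBox frame), some frame)

-- trailing `if current_interval: intervals.append(current_interval)` + return
def pvFinish
    (st : List (List (List (String × Int))) × List (List (String × Int)) × Option Int) :
    List (List (List (String × Int))) :=
  if st.2.1 = [] then st.1 else st.1 ++ [st.2.1]

def group_detections_by_intervals (detections_per_frame : List (Int × List (List (String × List (String × Int))))) : List (List (List (String × Int))) :=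
  if detections_per_frame = [] then []
  else
    let d := PySem.Dict.ofList detections_per_frame
    let sorted_frames := PySem.List.sorted d.keys (fun x => x)
    pvFinish (sorted_frames.foldl (pvStepA d) ([], [], none))

-- ===== PORT B =====

-- body of B's `for i, f in enumerate(frames)` loop:
-- `groups.setdefault(f - i, []).extend(box(det) for det in detections_per_frame[f])` = Dict.modify
def pvStepB (d : PySem.Dict Int (List (List (String × List (String × Int)))))
    (groups : PySem.Dict Int (List (List (String × Int)))) (p : Int × Int) :
    PySem.Dict Int (List (List (String × Int))) :=
  groups.modify (p.2 - p.1) [] (fun v => v ++ (d.getD p.2 []).map (pvBox p.2))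

def group_detections_by_intervals_alt (detections_per_frame : List (Int × List (List (String × List (String × Int))))) : List (List (List (String × Int))) :=
  let d := PySem.Dict.ofList detections_per_frame
  -- frames = sorted(f for f, dets in detections_per_frame.items() if dets)
  let frames := PySem.List.sorted ((d.items.filter (fun q => !(q.2 == []))).map (fun q => q.1)) (fun x => x)
  ((PySem.List.enumerate frames 0).foldl (pvStepB d) PySem.Dict.empty).values

-- ===== PRECONDITION & SPEC =====
def Spec_group_detections_by_intervals (detections_per_frame : List (Int × List (List (String × List (String × Int))))) (out : List (List (List (String × Int)))) : Prop := out = group_detections_by_intervals_alt detections_per_frame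
instance (detections_per_frame : List (Int × List (List (String × List (String × Int))))) (out : List (List (List (String × Int)))) : Decidable (Spec_group_detections_by_intervals detections_per_frame out) := by unfold Spec_group_detections_by_intervals; infer_instance

-- ===== CLAIM (what is proved, stated in full; the proofs are below) =====
def Claim_equal_group_detections_by_intervals : Prop := ∀ (detections_per_frame : List (Int × List (List (String × List (String × Int))))), Dom_group_detections_by_intervals detections_per_frame → Spec_group_detections_by_intervals detections_per_frame (group_detections_by_intervals detections_per_frame)

-- ===== LEMMAS AND PROOFS =====

-- frames with detections, as a Bool predicate on a frame number
def pvLive (d : PySem.Dict Int (List (List (String × List (String × Int))))) (f : Int) : Bool :=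
  !(d.getD f [] == [])

-- the boxes contributed by one frame
def pvBoxes (d : PySem.Dict Int (List (List (String × List (String × Int))))) (f : Int) :
    List (List (String × Int)) :=
  (d.getD f []).map (pvBox f)

-- sorted keys are strictly increasing (keys of a dict are distinct)
theorem pv_sorted_keys_lt (d : PySem.Dict Int (List (List (String × List (String × Int)))))
    (hnd : d.keys.Nodup) :
    (PySem.List.sorted d.keys (fun x => x)).Pairwise (· < ·) := by
  have h1 := PySem.List.sorted_pairwise d.keys (fun x => x)
  have h2 : (PySem.List.sorted d.keys (fun x => x)).Nodup :=
    ((PySem.List.sorted_perm d.keys (fun x => x) false).nodup_iff).mpr hnd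
  exact (h1.and h2).imp (fun {a b} ⟨u, v⟩ => lt_of_le_of_ne u v)

-- B's sorted filtered frame list is A's sorted key list with the dead frames dropped
theorem pv_frames_eq (d : PySem.Dict Int (List (List (String × List (String × Int)))))
    (hnd : d.keys.Nodup) :
    PySem.List.sorted ((d.items.filter (fun q => !(q.2 == []))).map (fun q => q.1)) (fun x => x)
      = (PySem.List.sorted d.keys (fun x => x)).filter (pvLive d) := by
  apply PySem.List.sorted_eq_of_perm_of_pairwise_lt
  · have hkeys : d.keys.filter (pvLive d)
        = (d.items.filter (fun q => !(q.2 == []))).map (fun q => q.1) := by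
      have h1 : d.keys.filter (pvLive d)
          = (d.items.filter (fun q => pvLive d q.1)).map (fun q => q.1) := by
        simpa [PySem.Dict.keys, Function.comp] using
          (List.filter_map (f := fun q : Int × List (List (String × List (String × Int))) => q.1)
            (p := pvLive d) (l := d.items))
      rw [h1]
      congr 1
      apply List.filter_congr
      rintro ⟨a, b⟩ hq
      simp [pvLive, PySem.Dict.getD_of_mem_items d hq hnd]
    rw [← hkeys]
    exact ((PySem.List.sorted_perm d.keys (fun x => x) false).filter (pvLive d))
  · exact (pv_sorted_keys_lt d hnd).sublist (List.filter_sublist)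

theorem pv_enumerate_cons {α : Type} (x : α) (t : List α) (j : Int) :
    PySem.List.enumerate (x :: t) j = (j, x) :: PySem.List.enumerate t (j + 1) := by
  simp [PySem.List.enumerate]

theorem pv_contains_mk (l : List (Int × List (List (String × Int)))) (k : Int) :
    (PySem.Dict.mk l).contains k = decide (k ∈ l.map (fun q => q.1)) := by
  simpa using PySem.Dict.contains_eq_decide_mem_keys (PySem.Dict.mk l) k

theorem pv_getD_mk_last (itms : List (Int × List (List (String × Int)))) (k : Int)
    (run : List (List (String × Int))) (h : ∀ q ∈ itms, q.1 ≠ k) :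
    (PySem.Dict.mk (itms ++ [(k, run)])).getD k [] = run := by
  induction itms with
  | nil => simp [PySem.Dict.getD_eq_get?_getD, PySem.Dict.get?_mk_cons]
  | cons q t ih =>
    have hq : (q.1 == k) = false := by simpa using h q (by simp)
    rw [List.cons_append,
      show ((q :: (t ++ [(k, run)])) : List (Int × List (List (String × Int))))
        = (q.1, q.2) :: (t ++ [(k, run)]) by simp]
    rw [PySem.Dict.getD_eq_get?_getD, PySem.Dict.get?_mk_cons, hq]
    simp only [Bool.false_eq_true, if_false]
    rw [← PySem.Dict.getD_eq_get?_getD]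
    exact ih (fun p hp => h p (by simp [hp]))

theorem pv_insert_mk_fresh (l : List (Int × List (List (String × Int)))) (k : Int)
    (v : List (List (String × Int))) (h : k ∉ l.map (fun q => q.1)) :
    (PySem.Dict.mk l).insert k v = PySem.Dict.mk (l ++ [(k, v)]) := by
  apply PySem.Dict.ext
  rw [PySem.Dict.items_insert_of_not_contains]
  rw [pv_contains_mk]
  simpa using h

theorem pv_insert_mk_overwrite (itms : List (Int × List (List (String × Int)))) (k : Int)
    (run v : List (List (String × Int))) (h : ∀ q ∈ itms, q.1 ≠ k) :
    (PySem.Dict.mk (itms ++ [(k, run)])).insert k v = PySem.Dict.mk (itms ++ [(k, v)]) := by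
  apply PySem.Dict.ext
  rw [PySem.Dict.items_insert_of_contains]
  · show List.map _ (itms ++ [(k, run)]) = itms ++ [(k, v)]
    rw [List.map_append]
    congr 1
    · exact List.map_congr_left (fun q hq => by simp [h q hq]) |>.trans (List.map_id _)
    · simp
  · rw [pv_contains_mk]; simp

-- the lockstep invariant: A's fold over the sorted frames, from a state mirroring a dict with
-- items `itms` (+ possibly an open last run keyed k = lf - (j-1)), equals B's fold over the
-- enumerated live frames
theorem pv_lockstep (d : PySem.Dict Int (List (List (String × List (String × Int)))))
    (s : List Int) :
    s.Pairwise (· < ·) →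
    ((∀ (itms : List (Int × List (List (String × Int)))) (j : Int),
      (∀ q ∈ itms, ∀ f ∈ s, q.1 < f - j) →
      pvFinish (s.foldl (pvStepA d) (itms.map (fun q => q.2), [], none))
        = ((PySem.List.enumerate (s.filter (pvLive d)) j).foldl (pvStepB d)
            (PySem.Dict.mk itms)).values)
    ∧
    (∀ (itms : List (Int × List (List (String × Int)))) (j : Int)
       (k lf : Int) (run : List (List (String × Int))),
      run ≠ [] → k = lf - (j - 1) →
      (∀ f ∈ s, lf < f) →
      (∀ q ∈ itms, q.1 < k) →
      pvFinish (s.foldl (pvStepA d) (itms.map (fun q => q.2), run, some lf))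
        = ((PySem.List.enumerate (s.filter (pvLive d)) j).foldl (pvStepB d)
            (PySem.Dict.mk (itms ++ [(k, run)]))).values)) := by
  induction s with
  | nil =>
    intro _
    constructor
    · intro itms j _
      simp [pvFinish, PySem.Dict.values]
    · intro itms j k lf run hrun hk hlf hkeys
      simp [pvFinish, PySem.Dict.values, hrun]
  | cons x s' ih =>
    intro hs
    have hx : ∀ g ∈ s', x < g := (List.pairwise_cons.mp hs).1
    obtain ⟨ihN, ihS⟩ := ih (List.pairwise_cons.mp hs).2
    constructor
    · -- closed state (no open interval)
      intro itms j hfresh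
      rw [List.foldl_cons]
      by_cases hd : d.getD x [] = []
      · have hA : pvStepA d (itms.map (fun q => q.2), [], none) x
            = (itms.map (fun q => q.2), [], none) := by
          simp [pvStepA, hd]
        rw [hA, List.filter_cons_of_neg (by simp [pvLive, hd])]
        exact ihN itms j (fun q hq f hf => hfresh q hq f (by simp [hf]))
      · have hA : pvStepA d (itms.map (fun q => q.2), [], none) x
            = (itms.map (fun q => q.2), pvBoxes d x, some x) := by
          simp [pvStepA, hd, pvBoxes]
        have hfr : (PySem.Dict.mk itms).contains (x - j) = false := by
          rw [pv_contains_mk]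
          simp only [decide_eq_false_iff_not, List.mem_map, not_exists]
          rintro q ⟨hq, hq1⟩
          have := hfresh q hq x (by simp)
          omega
        have hB : pvStepB d (PySem.Dict.mk itms) (j, x)
            = PySem.Dict.mk (itms ++ [(x - j, pvBoxes d x)]) := by
          show (PySem.Dict.mk itms).modify (x - j) [] _ = _
          rw [PySem.Dict.modify, PySem.Dict.getD_of_not_contains _ _ hfr]
          rw [pv_insert_mk_fresh]
          · simp [pvBoxes]
          · simp only [decide_eq_false_iff_not, pv_contains_mk] at hfr
            exact hfr
        rw [List.filter_cons_of_pos (by simp [pvLive, hd]), pv_enumerate_cons,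
          List.foldl_cons, hA, hB]
        exact ihS itms (j + 1) (x - j) x (pvBoxes d x)
          (by simp [pvBoxes, hd]) (by omega) hx
          (fun q hq => hfresh q hq x (by simp))
    · -- open interval `run` ending at frame lf, dict key k = lf - (j-1)
      intro itms j k lf run hrun hk hlf hkeys
      have hxlf : lf < x := hlf x (by simp)
      rw [List.foldl_cons]
      by_cases hd : d.getD x [] = []
      · have hA : pvStepA d (itms.map (fun q => q.2), run, some lf) x
            = ((itms ++ [(k, run)]).map (fun q => q.2), [], none) := by
          simp [pvStepA, hd, hrun]
        rw [hA, List.filter_cons_of_neg (by simp [pvLive, hd])]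
        apply ihN (itms ++ [(k, run)]) j
        intro q hq f hf
        have hfx : x < f := hx f hf
        rcases List.mem_append.mp hq with h | h
        · have := hkeys q h; omega
        · simp only [List.mem_singleton] at h; subst h; simp; omega
      · by_cases hgap : x - lf > 1
        · -- gap: A flushes run, B opens a fresh key
          have hA : pvStepA d (itms.map (fun q => q.2), run, some lf) x
              = ((itms ++ [(k, run)]).map (fun q => q.2), pvBoxes d x, some x) := by
            simp [pvStepA, hd, hrun, hgap, pvBoxes]
          have hfr : (PySem.Dict.mk (itms ++ [(k, run)])).contains (x - j) = false := by
            rw [pv_contains_mk]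
            simp only [decide_eq_false_iff_not, List.mem_map, not_exists]
            rintro q ⟨hq, hq1⟩
            rcases List.mem_append.mp hq with h | h
            · have := hkeys q h; omega
            · simp only [List.mem_singleton] at h; subst h; simp at hq1; omega
          have hB : pvStepB d (PySem.Dict.mk (itms ++ [(k, run)])) (j, x)
              = PySem.Dict.mk ((itms ++ [(k, run)]) ++ [(x - j, pvBoxes d x)]) := by
            show (PySem.Dict.mk (itms ++ [(k, run)])).modify (x - j) [] _ = _
            rw [PySem.Dict.modify, PySem.Dict.getD_of_not_contains _ _ hfr]
            rw [pv_insert_mk_fresh]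
            · simp [pvBoxes]
            · simp only [decide_eq_false_iff_not, pv_contains_mk] at hfr
              exact hfr
          rw [List.filter_cons_of_pos (by simp [pvLive, hd]), pv_enumerate_cons,
            List.foldl_cons, hA, hB]
          apply ihS (itms ++ [(k, run)]) (j + 1) (x - j) x (pvBoxes d x)
            (by simp [pvBoxes, hd]) (by omega) hx
          intro q hq
          rcases List.mem_append.mp hq with h | h
          · have := hkeys q h; omega
          · simp only [List.mem_singleton] at h; subst h; simp; omega
        · -- consecutive: A extends run, B extends the value at key k
          have hxeq : x = lf + 1 := by omega
          have hA : pvStepA d (itms.map (fun q => q.2), run, some lf) x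
              = (itms.map (fun q => q.2), run ++ pvBoxes d x, some x) := by
            simp [pvStepA, hd, hgap, pvBoxes]
          have hkey : x - j = k := by omega
          have hne : ∀ q ∈ itms, q.1 ≠ k := fun q hq => ne_of_lt (hkeys q hq)
          have hB : pvStepB d (PySem.Dict.mk (itms ++ [(k, run)])) (j, x)
              = PySem.Dict.mk (itms ++ [(k, run ++ pvBoxes d x)]) := by
            show (PySem.Dict.mk (itms ++ [(k, run)])).modify (x - j) [] _ = _
            rw [PySem.Dict.modify, hkey, pv_getD_mk_last itms k run hne,
              pv_insert_mk_overwrite itms k run _ hne]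
            rfl
          rw [List.filter_cons_of_pos (by simp [pvLive, hd]), pv_enumerate_cons,
            List.foldl_cons, hA, hB]
          exact ihS itms (j + 1) k x (run ++ pvBoxes d x)
            (by simp [hrun]) (by omega) hx hkeys

-- ===== VERDICT (by name: the statement is the Claim_ definition above) =====
theorem group_detections_by_intervals_spec : Claim_equal_group_detections_by_intervals := by
  intro dpf _
  unfold Spec_group_detections_by_intervals
  unfold group_detections_by_intervals group_detections_by_intervals_alt
  by_cases hemp : dpf = []
  · subst hemp
    rfl
  · rw [if_neg hemp]
    have hnd := PySem.Dict.nodup_keys_ofList dpf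
    show pvFinish (List.foldl (pvStepA (PySem.Dict.ofList dpf)) ([], [], none)
        (PySem.List.sorted (PySem.Dict.ofList dpf).keys (fun x => x)))
      = (List.foldl (pvStepB (PySem.Dict.ofList dpf)) PySem.Dict.empty
          (PySem.List.enumerate (PySem.List.sorted
            (((PySem.Dict.ofList dpf).items.filter (fun q => !(q.2 == []))).map (fun q => q.1))
            (fun x => x)) 0)).values
    rw [pv_frames_eq (PySem.Dict.ofList dpf) hnd]
    have hlock := (pv_lockstep (PySem.Dict.ofList dpf)
      (PySem.List.sorted (PySem.Dict.ofList dpf).keys (fun x => x))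
      (pv_sorted_keys_lt (PySem.Dict.ofList dpf) hnd)).1 [] 0 (by simp)
    simpa using hlock
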